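-- pv_equiv track=rewrite | github.com/Paneer007/QLS | qls/qls_server.py | four_fold_key
-- ===== SOURCE A (Python) =====
-- def four_fold_key(key: list) -> list:
--     """
--     Splits a key into four equal parts and performs XOR operation on each part.
--
--     Parameters:
--         key (list): The input key to be processed.
--
--     Returns:
--         list: A list containing four values obtained by XOR-ing every fourth element of the input key.
--     """
--     leng = len(key)
--     dist = leng//4
--     arr = []
--     for i in range(0, dist):
--         val = 0
--         for j in range(i, leng, 4):
--             val ^= key[j]
--         arr.append(val)
--
--     lenmissin = 16 - len(arr)
--     arr += lenmissin*[0]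
--     return arr
-- ===== SOURCE B (Python) =====
-- def four_fold_key(key: list) -> list:
--     """O(n) re-implementation: one backward pass builds per-residue suffix XORs."""
--     leng = len(key)
--     dist = leng // 4
--     suf = [0] * (leng + 4)
--     for i in range(leng - 1, -1, -1):
--         suf[i] = key[i] ^ suf[i + 4]
--     return suf[:dist] + [0] * (16 - dist)
-- ===== Notes on version B (the rewrite author's own statement) =====
-- stated objective: faster
-- what changed: A recomputes each output by scanning every 4th element from each of the n/4 offsets (nested loops); B does one backward pass building a suffix-XOR table (suf[i] = key[i] ^ suf[i+4]) and slices off the first n//4 entries.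
import Mathlib
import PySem

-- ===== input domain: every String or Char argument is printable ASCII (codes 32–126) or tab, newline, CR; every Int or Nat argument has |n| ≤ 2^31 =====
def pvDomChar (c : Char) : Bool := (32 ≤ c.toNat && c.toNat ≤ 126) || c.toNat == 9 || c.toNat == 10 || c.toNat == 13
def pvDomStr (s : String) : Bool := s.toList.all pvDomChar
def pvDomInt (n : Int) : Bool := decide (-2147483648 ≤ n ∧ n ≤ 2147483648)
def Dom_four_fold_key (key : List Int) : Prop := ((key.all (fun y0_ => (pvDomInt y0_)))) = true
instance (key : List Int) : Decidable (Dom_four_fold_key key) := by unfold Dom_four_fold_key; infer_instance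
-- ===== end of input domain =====

-- B replaces A's quadratic nested loops by one backward pass building per-residue suffix XORs (objective: faster).

-- ===== PORT A =====
-- key[j] is always in range in A's inner loop, so pyGetD is exact there.
def four_fold_key (key : List Int) : List Int :=
  let leng : Int := PySem.List.len key
  let dist : Int := PySem.Int.floordiv leng 4
  let arr : List Int :=
    (PySem.List.pyRange 0 dist 1).foldl
      (fun arr i =>
        let val : Int :=
          (PySem.List.pyRange i leng 4).foldl
            (fun v j => PySem.Int.bxor v (PySem.List.pyGetD key j 0)) 0
        arr ++ [val]) []
  let lenmissin : Int := 16 - PySem.List.len arr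
  arr ++ List.replicate lenmissin.toNat 0

-- ===== PORT B =====
-- suf[i] = ... is an in-range assignment, so pySetD/pyGetD are exact there.
def four_fold_key_alt (key : List Int) : List Int :=
  let leng : Int := PySem.List.len key
  let dist : Int := PySem.Int.floordiv leng 4
  let suf0 : List Int := List.replicate (leng + 4).toNat 0
  let suf : List Int :=
    (PySem.List.pyRange (leng - 1) (-1) (-1)).foldl
      (fun suf i =>
        PySem.List.pySetD suf i
          (PySem.Int.bxor (PySem.List.pyGetD key i 0) (PySem.List.pyGetD suf (i + 4) 0))) suf0
  PySem.List.slice suf none (some dist) ++ List.replicate (16 - dist).toNat 0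

-- ===== PRECONDITION & SPEC =====
def Spec_four_fold_key (key : List Int) (out : List Int) : Prop := out = four_fold_key_alt key
instance (key : List Int) (out : List Int) : Decidable (Spec_four_fold_key key out) := by unfold Spec_four_fold_key; infer_instance

-- ===== CLAIM (what is proved, stated in full; the proofs are below) =====
def Claim_equal_four_fold_key : Prop := ∀ (key : List Int), Dom_four_fold_key key → Spec_four_fold_key key (four_fold_key key)

-- ===== LEMMAS AND PROOFS =====

-- the mathematical value both programs compute at offset i: XOR of key[i], key[i+4], …
def sufXor (key : List Int) (i : Nat) : Int :=
  if _h : i < key.length then PySem.Int.bxor (key.getD i 0) (sufXor key (i + 4)) else 0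
termination_by key.length - i
decreasing_by omega

theorem bxor_eq_xor (a b : Int) : PySem.Int.bxor a b = Int.xor a b := by
  rcases a with m | m <;> rcases b with n | n <;>
    simp [PySem.Int.bxor, Int.xor, Int.negSucc_eq] <;> omega

theorem int_xor_assoc (a b c : Int) : Int.xor (Int.xor a b) c = Int.xor a (Int.xor b c) := by
  rcases a with m | m <;> rcases b with n | n <;> rcases c with p | p <;>
    simp [Int.xor, Nat.xor_assoc]

theorem bxor_assoc (a b c : Int) : PySem.Int.bxor (PySem.Int.bxor a b) c = PySem.Int.bxor a (PySem.Int.bxor b c) := by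
  simp [bxor_eq_xor, int_xor_assoc]

theorem pyRange4_nil (a b : Int) (h : b ≤ a) : PySem.List.pyRange a b 4 = [] := by
  rw [PySem.List.pyRange_of_pos a b (by norm_num)]
  simp [show ¬ a < b by omega]

theorem pyRange4_cons (a b : Int) (h : a < b) : PySem.List.pyRange a b 4 = a :: PySem.List.pyRange (a + 4) b 4 := by
  rw [PySem.List.pyRange_of_pos a b (by norm_num), PySem.List.pyRange_of_pos (a + 4) b (by norm_num)]
  by_cases h4 : a + 4 < b
  · have hc : ((b - a + 4 - 1) / 4).toNat = ((b - (a + 4) + 4 - 1) / 4).toNat + 1 := by omega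
    simp only [if_pos h, if_pos h4, hc, List.range_succ_eq_map, List.map_cons, List.map_map]
    refine List.cons_eq_cons.mpr ⟨by norm_num, ?_⟩
    refine List.map_congr_left (fun k _ => ?_)
    simp only [Function.comp, Nat.succ_eq_add_one]
    push_cast
    ring
  · have hc : ((b - a + 4 - 1) / 4).toNat = 1 := by omega
    simp only [if_pos h, if_neg h4, hc, List.range_one]
    simp

theorem inner_eq (key : List Int) (i : Nat) :
    ∀ v : Int, (PySem.List.pyRange (i : Int) (key.length : Int) 4).foldl
      (fun v j => PySem.Int.bxor v (PySem.List.pyGetD key j 0)) v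
      = PySem.Int.bxor v (sufXor key i) := by
  refine sufXor.induct key (fun i => ∀ v : Int,
    (PySem.List.pyRange (i : Int) (key.length : Int) 4).foldl
      (fun v j => PySem.Int.bxor v (PySem.List.pyGetD key j 0)) v
      = PySem.Int.bxor v (sufXor key i)) ?_ ?_ i
  · intro i h ih v
    rw [pyRange4_cons _ _ (by exact_mod_cast h)]
    simp only [List.foldl_cons]
    have hcast : (i : Int) + 4 = ((i + 4 : Nat) : Int) := by push_cast; ring
    rw [hcast, ih]
    have hs : sufXor key i = PySem.Int.bxor (key.getD i 0) (sufXor key (i + 4)) := by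
      rw [sufXor, dif_pos h]
    rw [hs, PySem.List.pyGetD_natCast, bxor_assoc]
  · intro i h v
    rw [pyRange4_nil _ _ (by exact_mod_cast Nat.le_of_not_lt h), sufXor, dif_neg h]
    simp [PySem.Int.bxor_zero]

theorem suf_loop (key : List Int) (m : Nat) (hm : m ≤ key.length) (suf : List Int)
    (hlen : suf.length = key.length + 4)
    (hinv : ∀ k, m ≤ k → k < key.length + 4 → suf.getD k 0 = sufXor key k) :
    ((PySem.List.pyRange ((m : Int) - 1) (-1) (-1)).foldl
      (fun suf i =>
        PySem.List.pySetD suf i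
          (PySem.Int.bxor (PySem.List.pyGetD key i 0) (PySem.List.pyGetD suf (i + 4) 0))) suf).length
        = key.length + 4 ∧
    ∀ k, k < key.length + 4 →
      ((PySem.List.pyRange ((m : Int) - 1) (-1) (-1)).foldl
        (fun suf i =>
          PySem.List.pySetD suf i
            (PySem.Int.bxor (PySem.List.pyGetD key i 0) (PySem.List.pyGetD suf (i + 4) 0))) suf).getD k 0
        = sufXor key k := by
  induction m generalizing suf with
  | zero =>
    rw [PySem.List.pyRange_neg_one_eq_nil (by norm_num)]
    exact ⟨hlen, fun k hk => hinv k (Nat.zero_le k) hk⟩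
  | succ m ih =>
    have hstep : PySem.List.pyRange ((m + 1 : Nat) - 1 : Int) (-1) (-1)
        = (m : Int) :: PySem.List.pyRange ((m : Int) - 1) (-1) (-1) := by
      have he : ((m + 1 : Nat) - 1 : Int) = (m : Int) := by push_cast; ring
      rw [he, PySem.List.pyRange_neg_one_cons (by omega)]
    rw [hstep]
    simp only [List.foldl_cons]
    have hmlt : m < key.length := hm
    set w := PySem.Int.bxor (PySem.List.pyGetD key (m : Int) 0) (PySem.List.pyGetD suf ((m : Int) + 4) 0) with hw
    have hset : PySem.List.pySetD suf (m : Int) w = suf.set m w := PySem.List.pySetD_natCast suf m w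
    rw [hset]
    have hwval : w = sufXor key m := by
      rw [hw, sufXor]
      have h4 : ((m : Int) + 4) = ((m + 4 : Nat) : Int) := by push_cast; ring
      rw [h4, PySem.List.pyGetD_natCast, PySem.List.pyGetD_natCast, hinv (m + 4) (by omega) (by omega)]
      simp [dif_pos hmlt]
    apply ih (by omega)
    · simp [hlen]
    · intro k hk hk4
      by_cases hkm : k = m
      · subst hkm
        rw [List.getD_eq_getElem?_getD, List.getElem?_set_self (by omega), hwval]
        simp
      · rw [List.getD_eq_getElem?_getD, List.getElem?_set_ne (by omega)]
        rw [← List.getD_eq_getElem?_getD]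
        exact hinv k (by omega) hk4

-- ===== VERDICT (by name: the statement is the Claim_ definition above) =====
theorem four_fold_key_spec : Claim_equal_four_fold_key := by
  intro key _
  unfold Spec_four_fold_key four_fold_key four_fold_key_alt
  simp only [PySem.List.len_eq]
  set n := key.length with hn
  set dist : Int := PySem.Int.floordiv (n : Int) 4 with hdist
  have hdn : dist = ((n / 4 : Nat) : Int) := PySem.Int.floordiv_natCast n 4
  set d : Nat := n / 4 with hd
  -- A side
  have hA : (PySem.List.pyRange 0 dist 1).foldl
      (fun arr i => arr ++ [(PySem.List.pyRange i (n : Int) 4).foldl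
        (fun v j => PySem.Int.bxor v (PySem.List.pyGetD key j 0)) 0]) []
      = (List.range d).map (fun k => sufXor key k) := by
    rw [PySem.List.foldl_append_singleton_eq_map]
    rw [hdn, PySem.List.pyRange_zero_natCast]
    rw [List.map_map]
    refine List.map_congr_left (fun k _ => ?_)
    simp only [Function.comp]
    rw [inner_eq key k 0, PySem.Int.bxor_comm, PySem.Int.bxor_zero]
  -- B side
  have hd4 : d ≤ n := by omega
  obtain ⟨hreslen, hresval⟩ := suf_loop key n (le_refl n) (List.replicate ((n : Int) + 4).toNat 0)
    (by simp; omega)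
    (by
      intro k hk hk4
      rw [List.getD_replicate _ (by omega), sufXor, dif_neg (show ¬ k < key.length by omega)])
  set res := (PySem.List.pyRange ((n : Int) - 1) (-1) (-1)).foldl
      (fun suf i =>
        PySem.List.pySetD suf i
          (PySem.Int.bxor (PySem.List.pyGetD key i 0) (PySem.List.pyGetD suf (i + 4) 0)))
      (List.replicate ((n : Int) + 4).toNat 0) with hres
  have hB : PySem.List.slice res none (some dist) = (List.range d).map (fun k => sufXor key k) := by
    rw [hdn, PySem.List.slice_to_natCast]
    apply List.ext_getElem
    · simp [hreslen]; omega
    · intro k h1 h2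
      simp only [List.length_take, hreslen] at h1
      have hk : k < d := by omega
      simp only [List.getElem_take, List.getElem_map, List.getElem_range]
      have hv := hresval k (by omega)
      rw [List.getD_eq_getElem?_getD, List.getElem?_eq_getElem (by omega)] at hv
      simpa using hv
  rw [hA, hB]
  congr 1
  simp [hdn]
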